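-- pv_equiv track=rewrite | github.com/esauvisky/git-there-fast | main.py | strip_common_prefix
-- ===== SOURCE A (Python) =====
-- def strip_common_prefix(strings=[]):
--     split_strings = [s.split('/') for s in strings]
--     min_length = min(len(parts) for parts in split_strings)
--
--     common_prefix_length = 0
--     for i in range(min_length):
--         if all(parts[i] == split_strings[0][i] for parts in split_strings):
--             common_prefix_length += 1
--         else:
--             break
--
--     return ['/'.join(parts[common_prefix_length:]) for parts in split_strings]
-- ===== SOURCE B (Python) =====
-- def strip_common_prefix(strings=[]):
--     split_strings = [s.split('/') for s in strings]
--     prefix = split_strings[0]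
--     for parts in split_strings[1:]:
--         n = 0
--         while n < len(prefix) and n < len(parts) and prefix[n] == parts[n]:
--             n += 1
--         prefix = prefix[:n]
--     k = len(prefix)
--     return ['/'.join(parts[k:]) for parts in split_strings]
-- ===== Notes on version B (the rewrite author's own statement) =====
-- stated objective: alternative
-- what changed: B folds row-wise over the split paths, maintaining the running common-prefix list and shrinking it per row, instead of A's column-wise index loop that precomputes min_length and re-scans every row at each index with all(); both raise on the empty list (min vs. indexing [0]).
import Mathlib
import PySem

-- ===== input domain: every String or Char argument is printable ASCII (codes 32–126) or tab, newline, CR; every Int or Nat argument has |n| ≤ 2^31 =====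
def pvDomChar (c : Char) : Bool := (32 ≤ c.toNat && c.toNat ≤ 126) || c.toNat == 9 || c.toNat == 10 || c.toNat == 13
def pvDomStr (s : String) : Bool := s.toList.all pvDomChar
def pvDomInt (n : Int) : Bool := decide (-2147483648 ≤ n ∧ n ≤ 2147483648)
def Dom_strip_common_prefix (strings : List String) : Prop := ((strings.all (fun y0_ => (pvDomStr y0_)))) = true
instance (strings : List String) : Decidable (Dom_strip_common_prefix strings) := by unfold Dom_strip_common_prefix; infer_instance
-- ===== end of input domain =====

-- B replaces A's column-wise index loop (precomputed min_length, all-rows test per index)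
-- by a row-wise fold that maintains the running common-prefix list and shrinks it per row.

-- ===== PORT A =====
-- 'for i in range(min_length): if all(parts[i] == split_strings[0][i] ...) cpl += 1 else break';
-- parts[i] / split_strings[0][i] are ported as getD: exact, since i < minLen ≤ len(parts) and Pre_ gives split_strings ≠ []
def stripALoop (split : List (List String)) (first : List String) (minLen i cpl : Nat) : Nat :=
  if i < minLen then
    if split.all (fun parts => parts.getD i "" == first.getD i "") then
      stripALoop split first minLen (i + 1) (cpl + 1)
    else cpl
  else cpl
termination_by minLen - i

def strip_common_prefix (strings : List String) : List String :=
  let split := strings.map (fun s => (PySem.Str.split? s "/").getD [])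
  -- min(len(parts) for parts in split_strings): raises ValueError on empty — excluded by Pre_; getD 0 is never used inside Pre_
  let minLen := (PySem.List.min? (split.map List.length) (fun x => x)).getD 0
  let cpl := stripALoop split (split.getD 0 []) minLen 0 0
  split.map (fun parts => PySem.Str.join "/" (PySem.List.slice parts (some (cpl : Int)) none))

-- ===== PORT B =====
-- 'n = 0; while n < len(prefix) and n < len(parts) and prefix[n] == parts[n]: n += 1';
-- prefix[n] / parts[n] are ported as getD: exact, the guard keeps n in range
def lcpN (pre parts : List String) (n : Nat) : Nat :=
  if n < pre.length ∧ n < parts.length ∧ pre.getD n "" == parts.getD n "" then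
    lcpN pre parts (n + 1)
  else n
termination_by pre.length - n
decreasing_by omega

def strip_common_prefix_alt (strings : List String) : List String :=
  let split := strings.map (fun s => (PySem.Str.split? s "/").getD [])
  -- split_strings[0] raises IndexError on empty — excluded by Pre_; getD 0 is never used inside Pre_;
  -- 'prefix[:n]' is take n (n ≥ 0); 'split_strings[1:]' is drop 1
  let pre := (split.drop 1).foldl (fun pre parts => pre.take (lcpN pre parts 0)) (split.getD 0 [])
  let k := pre.length
  split.map (fun parts => PySem.Str.join "/" (PySem.List.slice parts (some (k : Int)) none))

-- ===== PRECONDITION & SPEC =====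
-- Pre_ excludes only the empty list, on which A raises ValueError (min() of an empty sequence) and B raises IndexError
def Pre_strip_common_prefix (strings : List String) : Prop := strings ≠ []
instance (strings : List String) : Decidable (Pre_strip_common_prefix strings) := by unfold Pre_strip_common_prefix; infer_instance
def pvWitness_strip_common_prefix : List String := ["a/b/c", "a/b/d"]

def Spec_strip_common_prefix (strings : List String) (out : List String) : Prop := out = strip_common_prefix_alt strings
instance (strings : List String) (out : List String) : Decidable (Spec_strip_common_prefix strings out) := by unfold Spec_strip_common_prefix; infer_instance

-- ===== CLAIM (what is proved, stated in full; the proofs are below) =====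
def Claim_equal_strip_common_prefix : Prop := ∀ (strings : List String), Dom_strip_common_prefix strings → Pre_strip_common_prefix strings → Spec_strip_common_prefix strings (strip_common_prefix strings)

-- ===== LEMMAS AND PROOFS =====

-- 'k is a common prefix length of all rows, relative to row p0'
def Pfx (p0 : List String) (split : List (List String)) (k : Nat) : Prop :=
  ∀ p ∈ split, k ≤ p.length ∧ ∀ i < k, p.getD i "" = p0.getD i ""

theorem Pfx_mono (p0 : List String) (split : List (List String)) {j k : Nat}
    (hjk : j ≤ k) (h : Pfx p0 split k) : Pfx p0 split j := by
  intro p hp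
  obtain ⟨h1, h2⟩ := h p hp
  exact ⟨le_trans hjk h1, fun i hi => h2 i (lt_of_lt_of_le hi hjk)⟩

-- a maximal common prefix length is unique
theorem Pfx_unique (p0 : List String) (split : List (List String)) {r1 r2 : Nat}
    (h1 : Pfx p0 split r1) (h1' : ¬ Pfx p0 split (r1 + 1))
    (h2 : Pfx p0 split r2) (h2' : ¬ Pfx p0 split (r2 + 1)) : r1 = r2 := by
  rcases lt_trichotomy r1 r2 with h | h | h
  · exact absurd (Pfx_mono p0 split (by omega) h2) h1'
  · exact h
  · exact absurd (Pfx_mono p0 split (by omega) h1) h2'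

-- foldl min over Nat: a lower bound that is attained
theorem foldl_min_le (l : List Nat) (a : Nat) :
    l.foldl min a ≤ a ∧ (∀ x ∈ l, l.foldl min a ≤ x) ∧ (l.foldl min a = a ∨ l.foldl min a ∈ l) := by
  induction l generalizing a with
  | nil => simp
  | cons b t ih =>
    simp only [List.foldl_cons]
    obtain ⟨ih1, ih2, ih3⟩ := ih (min a b)
    refine ⟨le_trans ih1 (by omega), ?_, ?_⟩
    · intro x hx
      rcases List.mem_cons.mp hx with rfl | hx
      · exact le_trans ih1 (by omega)
      · exact ih2 x hx
    · rcases ih3 with h | h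
      · by_cases hab : a ≤ b
        · exact Or.inl (h.trans (min_eq_left hab))
        · rw [h, min_eq_right (by omega)]
          exact Or.inr List.mem_cons_self
      · exact Or.inr (List.mem_cons_of_mem _ h)

-- A's loop computes a maximal common prefix length
theorem stripALoop_spec (p0 : List String) (split : List (List String)) (minLen : Nat)
    (hminle : ∀ p ∈ split, minLen ≤ p.length)
    (hmin : ∃ p ∈ split, p.length = minLen) :
    ∀ fuel i, minLen - i ≤ fuel → i ≤ minLen → Pfx p0 split i →
      Pfx p0 split (stripALoop split p0 minLen i i) ∧
      ¬ Pfx p0 split (stripALoop split p0 minLen i i + 1) := by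
  intro fuel
  induction fuel with
  | zero =>
    intro i hfuel hle hPfx
    have hi : i = minLen := by omega
    subst hi
    rw [stripALoop, if_neg (lt_irrefl i)]
    refine ⟨hPfx, fun hP => ?_⟩
    obtain ⟨p, hp, hlen⟩ := hmin
    have := (hP p hp).1
    omega
  | succ fuel ih =>
    intro i hfuel hle hPfx
    rw [stripALoop]
    by_cases hlt : i < minLen
    · rw [if_pos hlt]
      by_cases hc : split.all (fun parts => parts.getD i "" == p0.getD i "") = true
      · rw [if_pos hc]
        have hPfx' : Pfx p0 split (i + 1) := by
          intro p hp
          refine ⟨le_trans (by omega) (hminle p hp), fun j hj => ?_⟩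
          rcases Nat.lt_succ_iff_lt_or_eq.mp hj with hj | rfl
          · exact (hPfx p hp).2 j hj
          · exact beq_iff_eq.mp (List.all_eq_true.mp hc p hp)
        exact ih (i + 1) (by omega) (by omega) hPfx'
      · rw [if_neg hc]
        refine ⟨hPfx, fun hP => hc ?_⟩
        exact List.all_eq_true.mpr (fun p hp => beq_iff_eq.mpr ((hP p hp).2 i (by omega)))
    · rw [if_neg hlt]
      have hi : i = minLen := by omega
      subst hi
      refine ⟨hPfx, fun hP => ?_⟩
      obtain ⟨p, hp, hlen⟩ := hmin
      have := (hP p hp).1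
      omega

theorem getD_take (l : List String) (n i : Nat) (h : i < n) :
    (l.take n).getD i "" = l.getD i "" := by
  simp [List.getD, h]

-- B's inner while loop from n: result r with r ≤ both lengths, agreement on [n, r), mismatch at r
theorem lcpN_spec (pre parts : List String) :
    ∀ fuel n, pre.length - n ≤ fuel → n ≤ pre.length → n ≤ parts.length →
      (∀ i, n ≤ i → i < lcpN pre parts n → pre.getD i "" = parts.getD i "") ∧
      n ≤ lcpN pre parts n ∧ lcpN pre parts n ≤ pre.length ∧ lcpN pre parts n ≤ parts.length ∧
      ¬ (lcpN pre parts n < pre.length ∧ lcpN pre parts n < parts.length ∧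
          pre.getD (lcpN pre parts n) "" = parts.getD (lcpN pre parts n) "") := by
  intro fuel
  induction fuel with
  | zero =>
    intro n hfuel h1 h2
    have hc : ¬ (n < pre.length ∧ n < parts.length ∧ pre.getD n "" == parts.getD n "") := by
      intro ⟨h, _⟩; omega
    rw [lcpN, if_neg hc]
    exact ⟨fun i hi hi' => absurd hi' (by omega), le_refl n, by omega, h2, fun ⟨h, _⟩ => by omega⟩
  | succ fuel ih =>
    intro n hfuel h1 h2
    rw [lcpN]
    by_cases hc : n < pre.length ∧ n < parts.length ∧ pre.getD n "" == parts.getD n ""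
    · rw [if_pos hc]
      obtain ⟨hc1, hc2, hc3⟩ := hc
      obtain ⟨g1, g2, g3, g4, g5⟩ := ih (n + 1) (by omega) (by omega) (by omega)
      refine ⟨fun i hi hi' => ?_, by omega, g3, g4, g5⟩
      rcases Nat.eq_or_lt_of_le hi with rfl | hi
      · exact beq_iff_eq.mp hc3
      · exact g1 i hi hi'
    · rw [if_neg hc]
      exact ⟨fun i hi hi' => absurd hi' (by omega), le_refl n, h1, h2,
        fun ⟨a, b, c⟩ => hc ⟨a, b, beq_iff_eq.mpr c⟩⟩

-- B's fold: maintains a prefix of p0 that is a maximal common prefix of the rows seen so far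
theorem foldB_spec (p0 : List String) (split : List (List String)) :
    ∀ (rem : List (List String)) (acc : List String),
      (∀ q ∈ rem, q ∈ split) →
      acc.length ≤ p0.length →
      (∀ i < acc.length, acc.getD i "" = p0.getD i "") →
      ¬ Pfx p0 split (acc.length + 1) →
      (rem.foldl (fun pre parts => pre.take (lcpN pre parts 0)) acc).length ≤ acc.length ∧
      ¬ Pfx p0 split ((rem.foldl (fun pre parts => pre.take (lcpN pre parts 0)) acc).length + 1) ∧
      (∀ q ∈ rem, (rem.foldl (fun pre parts => pre.take (lcpN pre parts 0)) acc).length ≤ q.length ∧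
        ∀ i < (rem.foldl (fun pre parts => pre.take (lcpN pre parts 0)) acc).length,
          q.getD i "" = p0.getD i "") := by
  intro rem
  induction rem with
  | nil =>
    intro acc _ hlen hagree hneg
    exact ⟨le_refl _, hneg, by simp⟩
  | cons q rem' ih =>
    intro acc hsub hlen hagree hneg
    obtain ⟨g1, g2, g3, g4, g5⟩ := lcpN_spec acc q acc.length 0 (by omega) (by omega) (by omega)
    set n := lcpN acc q 0 with hn
    have hlenTake : (acc.take n).length = n := by simp; omega
    have hagree' : ∀ i < (acc.take n).length, (acc.take n).getD i "" = p0.getD i "" := by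
      intro i hi
      rw [hlenTake] at hi
      rw [getD_take acc n i hi]
      exact hagree i (by omega)
    have hneg' : ¬ Pfx p0 split ((acc.take n).length + 1) := by
      rw [hlenTake]
      rcases Nat.eq_or_lt_of_le g3 with heq | hltn
      · rw [heq]; exact hneg
      · intro hP
        obtain ⟨hq1, hq2⟩ := hP q (hsub q List.mem_cons_self)
        exact g5 ⟨hltn, by omega, by rw [hagree n hltn, hq2 n (by omega)]⟩
    obtain ⟨r1, r3, r4⟩ := ih (acc.take n)
      (fun p hp => hsub p (List.mem_cons_of_mem _ hp)) (by rw [hlenTake]; omega) hagree' hneg'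
    simp only [List.foldl_cons, ← hn]
    refine ⟨le_trans r1 (by rw [hlenTake]; omega), r3, ?_⟩
    intro p hp
    rcases List.mem_cons.mp hp with rfl | hp
    · rw [hlenTake] at r1
      refine ⟨le_trans r1 (by omega), fun i hi => ?_⟩
      have hin : i < n := by omega
      rw [← g1 i (by omega) hin]
      exact hagree i (by omega)
    · exact r4 p hp

-- the two loops compute the same maximal common prefix length
theorem counts_eq (p0 : List String) (rest : List (List String)) :
    stripALoop (p0 :: rest) ((p0 :: rest).getD 0 [])
        ((PySem.List.min? ((p0 :: rest).map List.length) (fun x => x)).getD 0) 0 0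
      = (((p0 :: rest).drop 1).foldl (fun pre parts => pre.take (lcpN pre parts 0))
          ((p0 :: rest).getD 0 [])).length := by
  have hM : (PySem.List.min? ((p0 :: rest).map List.length) (fun x => x)).getD 0
      = (rest.map List.length).foldl min p0.length := by
    simp [PySem.List.min?_id_cons]
  obtain ⟨m1, m2, m3⟩ := foldl_min_le (rest.map List.length) p0.length
  set M := (rest.map List.length).foldl min p0.length with hMdef
  have hminle : ∀ p ∈ p0 :: rest, M ≤ p.length := by
    intro p hp
    rcases List.mem_cons.mp hp with rfl | hp
    · exact m1
    · exact m2 _ (List.mem_map_of_mem hp)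
  have hmin : ∃ p ∈ p0 :: rest, p.length = M := by
    rcases m3 with h | h
    · exact ⟨p0, List.mem_cons_self, h.symm⟩
    · obtain ⟨p, hp, hlen⟩ := List.mem_map.mp h
      exact ⟨p, List.mem_cons_of_mem _ hp, hlen⟩
  have hPfx0 : Pfx p0 (p0 :: rest) 0 :=
    fun p hp => ⟨Nat.zero_le _, fun i hi => absurd hi (Nat.not_lt_zero i)⟩
  obtain ⟨hA1, hA2⟩ := stripALoop_spec p0 (p0 :: rest) M hminle hmin M 0 (by omega) (by omega) hPfx0
  have hnegInit : ¬ Pfx p0 (p0 :: rest) (p0.length + 1) := by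
    intro hP
    have := (hP p0 List.mem_cons_self).1
    omega
  obtain ⟨r1, r3, r4⟩ := foldB_spec p0 (p0 :: rest) rest p0
    (fun q hq => List.mem_cons_of_mem _ hq) (le_refl _) (fun i _ => rfl) hnegInit
  set res := rest.foldl (fun pre parts => pre.take (lcpN pre parts 0)) p0 with hres
  have hB1 : Pfx p0 (p0 :: rest) res.length := by
    intro p hp
    rcases List.mem_cons.mp hp with rfl | hp
    · exact ⟨r1, fun i _ => rfl⟩
    · exact r4 p hp
  simp only [List.getD_cons_zero, List.drop_one, List.tail_cons, hM, ← hres]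
  exact Pfx_unique p0 (p0 :: rest) hA1 hA2 hB1 r3

-- ===== VERDICT (by name: the statement is the Claim_ definition above) =====
theorem strip_common_prefix_spec : Claim_equal_strip_common_prefix := by
  intro strings _ hpre
  unfold Spec_strip_common_prefix
  cases strings with
  | nil => exact absurd rfl hpre
  | cons s tl =>
    simp only [strip_common_prefix, strip_common_prefix_alt]
    rw [List.map_cons, counts_eq]
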